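-- pv_equiv track=rewrite | github.com/savagexr3/videotto | src/debouncer.py | debounce_speaker_ids
-- ===== SOURCE A (Python) =====
-- def debounce_speaker_ids(speaker_track_ids, min_hold_frames=15):
--     """
--     Remove rapid speaker-ID bounces shorter than min_hold_frames.
--
--     Speaker detection sometimes flickers the active-speaker label during
--     crosstalk or brief classification uncertainty, producing 1-10 frame
--     segments that cause jarring rapid-fire crop snaps. This pre-filter
--     replaces those short segments with the surrounding stable speaker ID
--     so the downstream dead-zone tracker never sees them.
--
--     Algorithm:
--       1. Run-length encode the raw IDs into (track_id, start, length) runs.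
--       2. For any run shorter than min_hold_frames, replace it with the
--          previous stable run's ID (or the next stable run if it's the first).
--       3. Expand back to a per-frame list.
--
--     Args:
--         speaker_track_ids: Per-frame list of speaker IDs (int or None).
--             None means no speaker detected at that frame.
--         min_hold_frames: Minimum frames a speaker must hold to be "stable".
--
--     Returns:
--         Same-length list with short flicker runs replaced by nearest stable ID.
--         None segments are never modified.
--     """
--     if not speaker_track_ids:
--         return []
--
--     if min_hold_frames <= 1:
--         return list(speaker_track_ids)
--
--     # Run-length encode
--     runs = []
--     start = 0
--     current_id = speaker_track_ids[0]
--
--     for i in range(1, len(speaker_track_ids)):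
--         if speaker_track_ids[i] != current_id:
--             runs.append([current_id, start, i - start])
--             current_id = speaker_track_ids[i]
--             start = i
--     runs.append([current_id, start, len(speaker_track_ids) - start])
--
--     debounced_runs = [run[:] for run in runs]
--
--     for i, (track_id, _start, length) in enumerate(runs):
--         if track_id is None or length >= min_hold_frames:
--             continue
--
--         replacement_id = None
--
--         # Prefer previous stable non-None run
--         for j in range(i - 1, -1, -1):
--             prev_id, _prev_start, prev_len = debounced_runs[j]
--             if prev_id is not None and prev_len >= min_hold_frames:
--                 replacement_id = prev_id
--                 break
--
--         # If none before, use next stable non-None run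
--         if replacement_id is None:
--             for j in range(i + 1, len(runs)):
--                 next_id, _next_start, next_len = runs[j]
--                 if next_id is not None and next_len >= min_hold_frames:
--                     replacement_id = next_id
--                     break
--
--         if replacement_id is not None:
--             debounced_runs[i][0] = replacement_id
--
--     # Expand back to per-frame IDs
--     result = []
--     for track_id, _start, length in debounced_runs:
--         result.extend([track_id] * length)
--
--     return result
-- ===== SOURCE B (Python) =====
-- def debounce_speaker_ids(speaker_track_ids, min_hold_frames=15):
--     """Same behaviour as A, but nearest stable IDs are precomputed in two
--     linear passes over the runs instead of nested per-run scans (O(N))."""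
--     if not speaker_track_ids:
--         return []
--     if min_hold_frames <= 1:
--         return list(speaker_track_ids)
--
--     # Run-length encode into (id, length) pairs.
--     runs = []
--     cur = speaker_track_ids[0]
--     cnt = 0
--     for x in speaker_track_ids:
--         if x == cur:
--             cnt += 1
--         else:
--             runs.append((cur, cnt))
--             cur, cnt = x, 1
--     runs.append((cur, cnt))
--
--     stable = lambda tid, ln: tid is not None and ln >= min_hold_frames
--
--     # Forward pass: nearest previous stable ID for each run.
--     prev_stable = []
--     last = None
--     for tid, ln in runs:
--         prev_stable.append(last)
--         if stable(tid, ln):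
--             last = tid
--
--     # Backward pass: nearest next stable ID for each run.
--     next_stable = []
--     nxt = None
--     for tid, ln in reversed(runs):
--         next_stable.append(nxt)
--         if stable(tid, ln):
--             nxt = tid
--     next_stable.reverse()
--
--     out = []
--     for (tid, ln), p, nx in zip(runs, prev_stable, next_stable):
--         if tid is not None and ln < min_hold_frames:
--             rep = p if p is not None else nx
--             if rep is not None:
--                 tid = rep
--         out.extend([tid] * ln)
--     return out
-- ===== Notes on version B (the rewrite author's own statement) =====
-- stated objective: faster
-- what changed: A finds each short run's replacement ID with nested backward/forward scans over the run list (O(R^2) worst case); B precomputes nearest-previous and nearest-next stable run IDs in two linear passes over (id, length) runs and assigns replacements in one zip pass (O(N)).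
import Mathlib
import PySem

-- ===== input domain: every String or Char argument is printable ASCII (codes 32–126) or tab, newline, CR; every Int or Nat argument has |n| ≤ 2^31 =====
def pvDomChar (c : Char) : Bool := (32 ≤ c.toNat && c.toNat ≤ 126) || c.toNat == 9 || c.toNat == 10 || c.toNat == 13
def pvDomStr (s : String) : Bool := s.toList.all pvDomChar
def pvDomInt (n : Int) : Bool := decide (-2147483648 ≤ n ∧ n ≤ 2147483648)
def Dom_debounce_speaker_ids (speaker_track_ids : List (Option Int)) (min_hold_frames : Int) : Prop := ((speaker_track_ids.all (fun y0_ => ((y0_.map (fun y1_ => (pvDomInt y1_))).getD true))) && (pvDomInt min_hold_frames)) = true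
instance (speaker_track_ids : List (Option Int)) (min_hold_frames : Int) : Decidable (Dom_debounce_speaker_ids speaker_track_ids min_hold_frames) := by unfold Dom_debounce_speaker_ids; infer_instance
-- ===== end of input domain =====

-- B replaces A's nested per-run backward/forward scans for the nearest stable run by two
-- linear passes precomputing nearest-previous/next stable IDs (objective: faster, O(R^2)→O(R) over runs).

-- ===== PORT A =====
-- run-length encode: the index loop of A, as structural recursion over the tail with the same state
def pvRleA : List (Option Int) → Int → Int → Option Int → List (Option Int × Int × Int) → List (Option Int × Int × Int)
  | [], i, start, cur, runs => runs ++ [(cur, start, i - start)]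
  | x :: rest, i, start, cur, runs =>
    if x ≠ cur then pvRleA rest (i + 1) i x (runs ++ [(cur, start, i - start)])
    else pvRleA rest (i + 1) start cur runs

-- A's backward scan `for j in range(i-1, -1, -1)` over debounced_runs
def pvFindPrevA (d : List (Option Int × Int × Int)) (m : Int) : Nat → Option Int
  | 0 => none
  | j + 1 =>
    match d[j]? with
    | some (some v, _, plen) => if m ≤ plen then some v else pvFindPrevA d m j
    | some (none, _, _) => pvFindPrevA d m j
    | none => none

-- A's forward scan `for j in range(i+1, len(runs))` over runs (given as runs.drop (i+1))
def pvFindNextA (m : Int) : List (Option Int × Int × Int) → Option Int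
  | [] => none
  | (some v, _, nlen) :: rest => if m ≤ nlen then some v else pvFindNextA m rest
  | (none, _, _) :: rest => pvFindNextA m rest

-- the body of A's `for i, (track_id, _start, length) in enumerate(runs)` loop
def pvBodyA (m : Int) (runs : List (Option Int × Int × Int)) (d : List (Option Int × Int × Int))
    (p : Int × (Option Int × Int × Int)) : List (Option Int × Int × Int) :=
  let i := p.1.toNat
  let tid := p.2.1
  let len := p.2.2.2
  if tid = none ∨ m ≤ len then d
  else
    let rep := pvFindPrevA d m i
    let rep := match rep with | none => pvFindNextA m (runs.drop (i + 1)) | some v => some v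
    match rep with
    | some v => d.modify i (fun r => (some v, r.2.1, r.2.2))   -- debounced_runs[i][0] = replacement_id
    | none => d

def pvLoopA (m : Int) (runs : List (Option Int × Int × Int)) : List (Option Int × Int × Int) :=
  (PySem.List.enumerate runs).foldl (pvBodyA m runs) runs

-- expand back to per-frame IDs
def pvExpandA (d : List (Option Int × Int × Int)) : List (Option Int) :=
  d.foldl (fun acc r => acc ++ List.replicate r.2.2.toNat r.1) []

def debounce_speaker_ids (speaker_track_ids : List (Option Int)) (min_hold_frames : Int) : List (Option Int) :=
  match speaker_track_ids with
  | [] => []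
  | c0 :: rest =>
    if min_hold_frames ≤ 1 then c0 :: rest
    else pvExpandA (pvLoopA min_hold_frames (pvRleA rest 1 0 c0 []))

-- ===== PORT B =====
def pvStableB (m : Int) (tid : Option Int) (ln : Int) : Bool := tid.isSome && decide (m ≤ ln)

-- B's run-length encoding into (id, length) pairs
def pvRleB : List (Option Int) → Option Int → Int → List (Option Int × Int) → List (Option Int × Int)
  | [], cur, cnt, runs => runs ++ [(cur, cnt)]
  | x :: rest, cur, cnt, runs =>
    if x = cur then pvRleB rest cur (cnt + 1) runs
    else pvRleB rest x 1 (runs ++ [(cur, cnt)])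

-- forward pass: nearest previous stable ID for each run
def pvPrevStables (m : Int) (runs : List (Option Int × Int)) : List (Option Int) :=
  (runs.foldl (fun (s : List (Option Int) × Option Int) r =>
      (s.1 ++ [s.2], if pvStableB m r.1 r.2 then r.1 else s.2)) ([], none)).1

-- backward pass: nearest next stable ID for each run
def pvNextStables (m : Int) (runs : List (Option Int × Int)) : List (Option Int) :=
  ((runs.reverse.foldl (fun (s : List (Option Int) × Option Int) r =>
      (s.1 ++ [s.2], if pvStableB m r.1 r.2 then r.1 else s.2)) ([], none)).1).reverse

-- B's output loop over zip(runs, prev_stable, next_stable)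
def pvOutB (m : Int) (l : List ((Option Int × Int) × Option Int × Option Int)) : List (Option Int) :=
  l.foldl (fun acc t =>
    acc ++
      (let tid' := if t.1.1 ≠ none ∧ t.1.2 < m then
          match (match t.2.1 with | some v => some v | none => t.2.2) with
          | some v => some v
          | none => t.1.1
        else t.1.1
       List.replicate t.1.2.toNat tid')) []

def debounce_speaker_ids_alt (speaker_track_ids : List (Option Int)) (min_hold_frames : Int) : List (Option Int) :=
  match speaker_track_ids with
  | [] => []
  | c0 :: rest =>
    if min_hold_frames ≤ 1 then c0 :: rest
    else
      let runs := pvRleB (c0 :: rest) c0 0 []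
      pvOutB min_hold_frames (runs.zip ((pvPrevStables min_hold_frames runs).zip (pvNextStables min_hold_frames runs)))

-- ===== PRECONDITION & SPEC =====
def Spec_debounce_speaker_ids (speaker_track_ids : List (Option Int)) (min_hold_frames : Int) (out : List (Option Int)) : Prop := out = debounce_speaker_ids_alt speaker_track_ids min_hold_frames
instance (speaker_track_ids : List (Option Int)) (min_hold_frames : Int) (out : List (Option Int)) : Decidable (Spec_debounce_speaker_ids speaker_track_ids min_hold_frames out) := by unfold Spec_debounce_speaker_ids; infer_instance

-- ===== CLAIM (what is proved, stated in full; the proofs are below) =====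
def Claim_equal_debounce_speaker_ids : Prop := ∀ (speaker_track_ids : List (Option Int)) (min_hold_frames : Int), Dom_debounce_speaker_ids speaker_track_ids min_hold_frames → Spec_debounce_speaker_ids speaker_track_ids min_hold_frames (debounce_speaker_ids speaker_track_ids min_hold_frames)

-- ===== LEMMAS AND PROOFS =====

-- projection from A's (id, start, length) runs to B's (id, length) runs
def pvPi (r : Option Int × Int × Int) : Option Int × Int := (r.1, r.2.2)

def pvStep (m : Int) (last : Option Int) (r : Option Int × Int) : Option Int :=
  if pvStableB m r.1 r.2 then r.1 else last

def pvLastO (m : Int) (l : List (Option Int × Int)) (last : Option Int) : Option Int :=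
  l.foldl (pvStep m) last

def pvFirstO (m : Int) : List (Option Int × Int) → Option Int
  | [] => none
  | r :: rest => if pvStableB m r.1 r.2 then r.1 else pvFirstO m rest

def pvNewId (m : Int) (tid : Option Int) (ln : Int) (last nx : Option Int) : Option Int :=
  if tid ≠ none ∧ ln < m then
    match (match last with | some v => some v | none => nx) with
    | some v => some v
    | none => tid
  else tid

def pvSpec2 (m : Int) (last : Option Int) : List (Option Int × Int) → List (Option Int × Int)
  | [] => []
  | r :: rest => (pvNewId m r.1 r.2 last (pvFirstO m rest), r.2) :: pvSpec2 m (pvStep m last r) rest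

def pvStep3 (m : Int) (last : Option Int) (r : Option Int × Int × Int) : Option Int :=
  pvStep m last (pvPi r)

def pvLast3 (m : Int) (l : List (Option Int × Int × Int)) (last : Option Int) : Option Int :=
  l.foldl (pvStep3 m) last

def pvSpec3 (m : Int) (last : Option Int) : List (Option Int × Int × Int) → List (Option Int × Int × Int)
  | [] => []
  | r :: rest => (pvNewId m r.1 r.2.2 last (pvFindNextA m rest), r.2.1, r.2.2) :: pvSpec3 m (pvStep3 m last r) rest

-- relation: each spec'd run is either unchanged or an unstable-length run on both sides
def pvRel (m : Int) (x y : Option Int × Int × Int) : Prop := x = y ∨ (x.2.2 < m ∧ y.2.2 < m)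

theorem pvRleAB : ∀ (rest : List (Option Int)) (cur : Option Int)
    (racc : List (Option Int × Int × Int)) (racc2 : List (Option Int × Int)) (i start : Int),
    racc.map pvPi = racc2 →
    (pvRleA rest i start cur racc).map pvPi = pvRleB rest cur (i - start) racc2 := by
  intro rest
  induction rest with
  | nil => intro cur racc racc2 i start h; subst h; simp [pvRleA, pvRleB, pvPi]
  | cons x t ih =>
    intro cur racc racc2 i start h
    subst h
    by_cases hx : x = cur
    · simp only [pvRleA, pvRleB, hx, ne_eq, not_true_eq_false, if_false]
      have e : i + 1 - start = i - start + 1 := by ring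
      rw [← e]; exact ih cur racc _ (i + 1) start rfl
    · simp only [pvRleA, pvRleB, ne_eq, hx, not_false_eq_true, if_pos]
      have h2 : (racc ++ [(cur, start, i - start)]).map pvPi
          = racc.map pvPi ++ [(cur, i - start)] := by simp [pvPi]
      rw [ih x (racc ++ [(cur, start, i - start)]) _ (i + 1) i h2]
      norm_num

theorem pvFindNextA_eq (m : Int) : ∀ (l : List (Option Int × Int × Int)),
    pvFindNextA m l = pvFirstO m (l.map pvPi) := by
  intro l
  induction l with
  | nil => rfl
  | cons r rest ih =>
    obtain ⟨tid, s, ln⟩ := r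
    cases tid <;> simp [pvFindNextA, pvFirstO, pvPi, pvStableB, ih]

theorem pvSpec3_map (m : Int) : ∀ (l : List (Option Int × Int × Int)) (last : Option Int),
    (pvSpec3 m last l).map pvPi = pvSpec2 m last (l.map pvPi) := by
  intro l
  induction l with
  | nil => intro last; rfl
  | cons r rest ih =>
    intro last
    simp [pvSpec3, pvSpec2, pvPi, pvStep3, ih, pvFindNextA_eq m]

theorem pvSpec3_length (m : Int) : ∀ (l : List (Option Int × Int × Int)) (last : Option Int),
    (pvSpec3 m last l).length = l.length := by
  intro l
  induction l with
  | nil => intro last; rfl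
  | cons r rest ih => intro last; simp [pvSpec3, ih]

theorem pvSpec3_get (m : Int) : ∀ (l : List (Option Int × Int × Int)) (last : Option Int) (k : Nat)
    (h : k < l.length),
    (pvSpec3 m last l)[k]? = some (pvNewId m l[k].1 l[k].2.2 (pvLast3 m (l.take k) last)
        (pvFindNextA m (l.drop (k + 1))), l[k].2.1, l[k].2.2) := by
  intro l
  induction l with
  | nil => intro last k h; simp at h
  | cons r rest ih =>
    intro last k h
    cases k with
    | zero => simp [pvSpec3, pvLast3]
    | succ k =>
      have hk : k < rest.length := by simpa using h
      simp only [pvSpec3, List.getElem?_cons_succ]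
      rw [ih (pvStep3 m last r) k hk]
      simp [pvLast3, List.take_succ_cons, List.getElem_cons_succ, List.drop_succ_cons]

theorem pvSpec3_rel (m : Int) : ∀ (l : List (Option Int × Int × Int)) (last : Option Int),
    List.Forall₂ (pvRel m) (pvSpec3 m last l) l := by
  intro l
  induction l with
  | nil => intro last; exact List.Forall₂.nil
  | cons r rest ih =>
    intro last
    refine List.Forall₂.cons ?_ (ih _)
    by_cases hc : r.1 ≠ none ∧ r.2.2 < m
    · exact Or.inr ⟨by simp [hc], hc.2⟩
    · left; simp [pvNewId, hc]

theorem pvLast3_congr (m : Int) : ∀ {l1 l2 : List (Option Int × Int × Int)},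
    List.Forall₂ (pvRel m) l1 l2 → ∀ (k : Nat) (last : Option Int),
    pvLast3 m (l1.take k) last = pvLast3 m (l2.take k) last := by
  intro l1 l2 h
  induction h with
  | nil => intro k last; rfl
  | @cons x y t1 t2 hxy htl ih =>
    intro k last
    cases k with
    | zero => rfl
    | succ k =>
      simp only [List.take_succ_cons, pvLast3, List.foldl_cons]
      have hstep : pvStep3 m last x = pvStep3 m last y := by
        rcases hxy with h | ⟨h1, h2⟩
        · rw [h]
        · simp [pvStep3, pvStep, pvStableB, pvPi, not_le.mpr h1, not_le.mpr h2]
      rw [hstep]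
      exact ih k _

theorem pvFindPrevA_eq (m : Int) : ∀ (k : Nat) (d : List (Option Int × Int × Int)),
    k ≤ d.length → pvFindPrevA d m k = pvLast3 m (d.take k) none := by
  intro k
  induction k with
  | zero => intro d h; rfl
  | succ k ih =>
    intro d h
    have hk : k < d.length := by omega
    have hget : d[k]? = some d[k] := List.getElem?_eq_getElem hk
    have htake : d.take (k + 1) = d.take k ++ [d[k]] := List.take_succ_eq_append_getElem hk
    have ihd := ih d (by omega)
    rcases hdk : d[k] with ⟨tid, s, ln⟩
    rw [hdk] at hget htake
    cases tid with
    | none =>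
      simp only [pvFindPrevA, hget, htake, pvLast3, List.foldl_append, List.foldl_cons,
        List.foldl_nil]
      rw [show pvFindPrevA d m k = _ from ihd]
      simp [pvLast3, pvStep3, pvStep, pvStableB, pvPi]
    | some v =>
      simp only [pvFindPrevA, hget, htake, pvLast3, List.foldl_append, List.foldl_cons,
        List.foldl_nil]
      by_cases hm : m ≤ ln
      · simp [pvStep3, pvStep, pvStableB, pvPi, hm]
      · rw [if_neg hm, show pvFindPrevA d m k = _ from ihd]
        simp [pvLast3, pvStep3, pvStep, pvStableB, pvPi, hm]

theorem pvModify_append {α : Type} : ∀ (l1 : List α) (x : α) (l2 : List α) (f : α → α),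
    (l1 ++ x :: l2).modify l1.length f = l1 ++ f x :: l2 := by
  intro l1
  induction l1 with
  | nil => intro x l2 f; simp [List.modify_cons]
  | cons a t ih => intro x l2 f; simp [ih]

theorem pvLoopA_aux (m : Int) (runs : List (Option Int × Int × Int)) :
    ∀ (suf : List (Option Int × Int × Int)) (k : Nat), runs.drop k = suf →
    ((PySem.List.enumerate suf (k : Int)).foldl (pvBodyA m runs)
        ((pvSpec3 m none runs).take k ++ suf)) = pvSpec3 m none runs := by
  intro suf
  induction suf with
  | nil =>
    intro k hk
    have hlen : runs.length ≤ k := by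
      by_contra hc
      exact absurd hk (by simp [List.drop_eq_nil_iff]; omega)
    simp [PySem.List.enumerate, List.take_of_length_le (le_trans (le_of_eq (pvSpec3_length m runs none)) hlen)]
  | cons r suf ih =>
    intro k hk
    have hkl : k < runs.length := by
      by_contra hc
      rw [List.drop_eq_nil_of_le (by omega)] at hk
      exact List.cons_ne_nil r suf hk.symm
    have hrunsk? : runs[k]? = some r := by
      have h0 : (runs.drop k)[0]? = some r := by rw [hk]; rfl
      simpa using h0
    have hrunsk : runs[k] = r := by
      have := List.getElem?_eq_getElem hkl
      rw [this] at hrunsk?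
      exact Option.some.inj hrunsk?
    have hdrop1 : runs.drop (k + 1) = suf := by
      have := congrArg (List.drop 1) hk
      simpa [List.drop_drop] using this
    have hSlen : (pvSpec3 m none runs).length = runs.length := pvSpec3_length m runs none
    have htklen : ((pvSpec3 m none runs).take k).length = k := by
      simp [hSlen]; omega
    have hdk : ((pvSpec3 m none runs).take k ++ r :: suf).take k = (pvSpec3 m none runs).take k :=
      List.take_left' htklen
    have hprev : pvFindPrevA ((pvSpec3 m none runs).take k ++ r :: suf) m k
        = pvLast3 m (runs.take k) none := by
      rw [pvFindPrevA_eq m k _ (by simp; omega), hdk,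
        pvLast3_congr m (pvSpec3_rel m runs none) k none]
    have hSk : (pvSpec3 m none runs)[k]? = some (pvNewId m r.1 r.2.2
        (pvLast3 m (runs.take k) none) (pvFindNextA m suf), r.2.1, r.2.2) := by
      rw [pvSpec3_get m runs none k hkl, hrunsk, hdrop1]
    have htake1 : (pvSpec3 m none runs).take (k + 1) = (pvSpec3 m none runs).take k ++
        [(pvNewId m r.1 r.2.2 (pvLast3 m (runs.take k) none) (pvFindNextA m suf), r.2.1, r.2.2)] := by
      rw [List.take_succ_eq_append_getElem (by omega)]
      have hg : (pvSpec3 m none runs)[k] = (pvNewId m r.1 r.2.2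
          (pvLast3 m (runs.take k) none) (pvFindNextA m suf), r.2.1, r.2.2) := by
        apply Option.some_injective
        rw [← List.getElem?_eq_getElem]
        exact hSk
      rw [hg]
    have hstep : pvBodyA m runs ((pvSpec3 m none runs).take k ++ r :: suf) ((k : Int), r)
        = (pvSpec3 m none runs).take (k + 1) ++ suf := by
      unfold pvBodyA
      simp only [Int.toNat_natCast, hdrop1, hprev]
      by_cases hcond : r.1 = none ∨ m ≤ r.2.2
      · rw [if_pos hcond, htake1]
        have : pvNewId m r.1 r.2.2 (pvLast3 m (runs.take k) none) (pvFindNextA m suf) = r.1 := by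
          unfold pvNewId
          rw [if_neg (by rintro ⟨h1, h2⟩; rcases hcond with h | h; exacts [h1 h, absurd h (by omega)])]
        rw [this]
        simp
      · rw [if_neg hcond]
        push_neg at hcond
        have hpos : r.1 ≠ none ∧ r.2.2 < m := ⟨hcond.1, by omega⟩
        rcases hL : pvLast3 m (runs.take k) none with _ | v
        · rcases hN : pvFindNextA m suf with _ | v
          · simp only [htake1, hL, hN]
            have hnew : pvNewId m r.1 r.2.2 none none = r.1 := by
              unfold pvNewId; rw [if_pos hpos]
            rw [hnew]
            simp
          · simp only [htake1, hL, hN]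
            have hnew : pvNewId m r.1 r.2.2 none (some v) = some v := by
              unfold pvNewId; rw [if_pos hpos]
            rw [hnew]
            have hmod := pvModify_append ((pvSpec3 m none runs).take k) r suf
              (fun r => (some v, r.2.1, r.2.2))
            rw [htklen] at hmod
            rw [hmod]
            simp
        · simp only [htake1, hL]
          have hnew : pvNewId m r.1 r.2.2 (some v) (pvFindNextA m suf) = some v := by
            unfold pvNewId; rw [if_pos hpos]
          rw [hnew]
          have hmod := pvModify_append ((pvSpec3 m none runs).take k) r suf
            (fun r => (some v, r.2.1, r.2.2))
          rw [htklen] at hmod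
          rw [hmod]
          simp
    rw [PySem.List.enumerate_cons, List.foldl_cons, hstep,
      show ((k : Int) + 1) = (((k + 1 : Nat)) : Int) by push_cast; ring]
    exact ih (k + 1) hdrop1

theorem pvLoopA_eq (m : Int) (runs : List (Option Int × Int × Int)) :
    pvLoopA m runs = pvSpec3 m none runs := by
  unfold pvLoopA
  have := pvLoopA_aux m runs runs 0 rfl
  simpa using this

def pvPrevR (m : Int) : Option Int → List (Option Int × Int) → List (Option Int)
  | _, [] => []
  | last, r :: rest => last :: pvPrevR m (pvStep m last r) rest

def pvNextR (m : Int) : List (Option Int × Int) → List (Option Int)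
  | [] => []
  | _ :: rest => pvFirstO m rest :: pvNextR m rest

theorem pvPrevFold (m : Int) : ∀ (runs : List (Option Int × Int)) (acc : List (Option Int)) (last : Option Int),
    runs.foldl (fun (s : List (Option Int) × Option Int) r =>
      (s.1 ++ [s.2], if pvStableB m r.1 r.2 then r.1 else s.2)) (acc, last)
      = (acc ++ pvPrevR m last runs, pvLastO m runs last) := by
  intro runs
  induction runs with
  | nil => intro acc last; simp [pvPrevR, pvLastO]
  | cons r rest ih =>
    intro acc last
    simp only [List.foldl_cons, ih, pvPrevR, pvLastO]
    simp [pvStep]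

theorem pvPrevR_append (m : Int) : ∀ (l : List (Option Int × Int)) (r : Option Int × Int) (last : Option Int),
    pvPrevR m last (l ++ [r]) = pvPrevR m last l ++ [pvLastO m l last] := by
  intro l
  induction l with
  | nil => intro r last; simp [pvPrevR, pvLastO]
  | cons x t ih => intro r last; simp [pvPrevR, ih, pvLastO, List.foldl_cons]

theorem pvLastO_reverse (m : Int) : ∀ (l : List (Option Int × Int)) (last : Option Int),
    pvLastO m l.reverse last = match pvFirstO m l with | some v => some v | none => last := by
  intro l
  induction l with
  | nil => intro last; rfl
  | cons r t ih =>
    intro last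
    simp only [List.reverse_cons, pvLastO, List.foldl_append, List.foldl_cons, List.foldl_nil]
    show pvStep m (pvLastO m t.reverse last) r = _
    rw [ih]
    rcases hr : r.1 with _ | v
    · simp [pvStep, pvStableB, pvFirstO, hr]
    · by_cases hl : m ≤ r.2
      · simp [pvStep, pvStableB, pvFirstO, hr, hl]
      · simp [pvStep, pvStableB, pvFirstO, hr, hl]

theorem pvNextStables_eq (m : Int) : ∀ (runs : List (Option Int × Int)),
    pvNextStables m runs = pvNextR m runs := by
  have key : ∀ l : List (Option Int × Int), (pvPrevR m none l.reverse).reverse = pvNextR m l := by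
    intro l
    induction l with
    | nil => rfl
    | cons r t ih =>
      rw [List.reverse_cons, pvPrevR_append m t.reverse r none, List.reverse_append,
        pvLastO_reverse m t none, ih]
      show (match pvFirstO m t with | some v => some v | none => none) :: _ = pvFirstO m t :: _
      cases pvFirstO m t <;> rfl
  intro runs
  unfold pvNextStables
  rw [pvPrevFold m runs.reverse [] none]
  simpa using key runs

theorem pvZipSpec (m : Int) : ∀ (runs : List (Option Int × Int)) (last : Option Int),
    (runs.zip ((pvPrevR m last runs).zip (pvNextR m runs))).flatMap
        (fun t => List.replicate t.1.2.toNat (pvNewId m t.1.1 t.1.2 t.2.1 t.2.2))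
      = (pvSpec2 m last runs).flatMap (fun r => List.replicate r.2.toNat r.1) := by
  intro runs
  induction runs with
  | nil => intro last; rfl
  | cons r rest ih =>
    intro last
    simp only [pvPrevR, pvNextR, List.zip_cons_cons, List.flatMap_cons, pvSpec2,
      ih (pvStep m last r)]

-- ===== VERDICT (by name: the statement is the Claim_ definition above) =====
theorem debounce_speaker_ids_spec : Claim_equal_debounce_speaker_ids := by
  unfold Claim_equal_debounce_speaker_ids Spec_debounce_speaker_ids
  intro xs m _
  unfold debounce_speaker_ids debounce_speaker_ids_alt
  cases xs with
  | nil => rfl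
  | cons c0 rest =>
    by_cases hm : m ≤ 1
    · simp [hm]
    · simp only [if_neg hm]
      rw [pvLoopA_eq]
      unfold pvExpandA pvOutB
      rw [PySem.List.foldl_append_eq_flatMap, PySem.List.foldl_append_eq_flatMap]
      simp only [List.nil_append]
      have hrle : (pvRleA rest 1 0 c0 []).map pvPi = pvRleB (c0 :: rest) c0 0 [] := by
        have := pvRleAB rest c0 [] [] 1 0 rfl
        simpa [pvRleB] using this
      have h3 : (pvSpec3 m none (pvRleA rest 1 0 c0 [])).flatMap
            (fun r => List.replicate r.2.2.toNat r.1)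
          = (pvSpec2 m none (pvRleB (c0 :: rest) c0 0 [])).flatMap
            (fun r => List.replicate r.2.toNat r.1) := by
        rw [← hrle, ← pvSpec3_map m _ none, List.flatMap_map]
        rfl
      rw [h3]
      set runsB := pvRleB (c0 :: rest) c0 0 [] with hrunsB
      have hps : pvPrevStables m runsB = pvPrevR m none runsB := by
        unfold pvPrevStables
        rw [pvPrevFold m runsB [] none]
        simp
      rw [hps, pvNextStables_eq m runsB]
      exact (pvZipSpec m runsB none).symm
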